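-- pv_equiv track=rewrite | github.com/shasankp000/Lexis | lexis_r/decompress.py | _reconstruct_sentinel_deltas_per_sentence
-- ===== SOURCE A (Python) =====
-- from typing import Any, Dict, List
--
-- def _sentinel_layout(lengths: List[int]) -> List[bool]:
--     """Return a boolean mask where True = sentinel (^ or $) position.
--
--     Inter-token spaces are marked False (they are content delta positions
--     used by _reconstruct_sentinel_deltas_per_sentence).
--     """
--     layout: List[bool] = []
--     for t_idx, length in enumerate(lengths):
--         layout.append(True)
--         layout.extend([False] * length)
--         layout.append(True)
--         if t_idx < len(lengths) - 1:
--             layout.append(False)  # inter-token space: content delta, not sentinel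
--     return layout
--
-- def _reconstruct_sentinel_deltas_per_sentence(
--     content_nested: List[List[int]], root_lengths_nested: List[List[int]]
-- ) -> List[List[int]]:
--     full_nested: List[List[int]] = []
--     for s_idx, content in enumerate(content_nested):
--         lengths      = root_lengths_nested[s_idx] if s_idx < len(root_lengths_nested) else []
--         layout       = _sentinel_layout(lengths)
--         content_iter = iter(content)
--         full: List[int] = []
--         prev_abs_pos: int | None = None
--         sent_count = 0
--         for is_sent in layout:
--             if is_sent:
--                 target_abs = 0 if sent_count % 2 == 0 else 1
--                 full.append(target_abs if prev_abs_pos is None else target_abs - prev_abs_pos)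
--                 prev_abs_pos = target_abs
--                 sent_count  += 1
--             else:
--                 delta = next(content_iter, 0)
--                 prev_abs_pos = delta if prev_abs_pos is None else prev_abs_pos + delta
--                 full.append(delta)
--         full_nested.append(full)
--     return full_nested
-- ===== SOURCE B (Python) =====
-- def _reconstruct_sentinel_deltas_per_sentence(content_nested, root_lengths_nested):
--     full_nested = []
--     for s_idx, content in enumerate(content_nested):
--         lengths = root_lengths_nested[s_idx] if s_idx < len(root_lengths_nested) else []
--         it = iter(content)
--         abs_pos = []
--         prev = 0
--         for t_idx, length in enumerate(lengths):
--             abs_pos.append(0)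
--             prev = 0
--             for _ in range(length):
--                 prev += next(it, 0)
--                 abs_pos.append(prev)
--             abs_pos.append(1)
--             prev = 1
--             if t_idx < len(lengths) - 1:
--                 prev += next(it, 0)
--                 abs_pos.append(prev)
--         full = [abs_pos[i] - (abs_pos[i - 1] if i > 0 else 0) for i in range(len(abs_pos))]
--         full_nested.append(full)
--     return full_nested
-- ===== Notes on version B (the rewrite author's own statement) =====
-- stated objective: alternative
-- what changed: B replaces A's single stateful pass over a precomputed boolean sentinel-layout mask (tracking an Optional previous absolute position and a sentinel parity counter) by two passes: it first builds the list of absolute positions directly from the token lengths while consuming the content iterator, then recovers every output element as abs[i]-abs[i-1] (with abs[-1]=0) by a final differencing pass.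
import Mathlib
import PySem

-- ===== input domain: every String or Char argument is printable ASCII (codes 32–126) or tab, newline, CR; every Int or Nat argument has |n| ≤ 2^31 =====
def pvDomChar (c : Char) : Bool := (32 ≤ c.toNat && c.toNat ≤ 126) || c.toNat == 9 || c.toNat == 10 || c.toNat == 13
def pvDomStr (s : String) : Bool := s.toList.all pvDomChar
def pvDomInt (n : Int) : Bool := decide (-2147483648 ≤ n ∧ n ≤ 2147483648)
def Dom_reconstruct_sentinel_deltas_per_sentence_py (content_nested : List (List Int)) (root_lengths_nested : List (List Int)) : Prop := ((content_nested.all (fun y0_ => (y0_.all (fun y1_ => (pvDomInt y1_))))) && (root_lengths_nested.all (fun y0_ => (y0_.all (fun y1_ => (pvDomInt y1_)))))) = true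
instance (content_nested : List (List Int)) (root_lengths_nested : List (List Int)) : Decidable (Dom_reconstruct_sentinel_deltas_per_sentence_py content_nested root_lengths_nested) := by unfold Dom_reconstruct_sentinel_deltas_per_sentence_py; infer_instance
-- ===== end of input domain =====

-- B replaces A's single stateful pass over a boolean sentinel-layout mask by a two-pass
-- scheme (build absolute positions, then take successive differences); same cost, no speed claim.

-- ===== PORT A =====

-- _sentinel_layout: loop over enumerate(lengths); [False]*length is empty for length < 0
def pySentinelLayout (lengths : List Int) : List Bool :=
  (PySem.List.enumerate lengths).foldl
    (fun layout p =>
      (layout ++ [true] ++ List.replicate p.2.toNat false ++ [true]) ++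
        (if p.1 < PySem.List.len lengths - 1 then [false] else []))
    []

-- the body of A's `for is_sent in layout` loop; state = (full, prev_abs_pos, sent_count, remaining content iterator)
def stepA (st : List Int × Option Int × Nat × List Int) (is_sent : Bool) :
    List Int × Option Int × Nat × List Int :=
  match st with
  | (full, prev, cnt, rem) =>
    if is_sent then
      let target : Int := if cnt % 2 = 0 then 0 else 1
      (full ++ [match prev with | none => target | some p => target - p], some target, cnt + 1, rem)
    else
      let delta := rem.headD 0        -- next(content_iter, 0)
      (full ++ [delta], some (match prev with | none => delta | some p => p + delta), cnt, rem.tail)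

-- the body of A's outer `for s_idx, content in enumerate(content_nested)` loop
def sentenceA (content lengths : List Int) : List Int :=
  ((pySentinelLayout lengths).foldl stepA ([], (none : Option Int), (0 : Nat), content)).1

def reconstruct_sentinel_deltas_per_sentence_py (content_nested : List (List Int)) (root_lengths_nested : List (List Int)) : List (List Int) :=
  (PySem.List.enumerate content_nested).foldl
    (fun full_nested p =>
      let lengths := if p.1 < PySem.List.len root_lengths_nested
                     then PySem.List.pyGetD root_lengths_nested p.1 [] else []
      full_nested ++ [sentenceA p.2 lengths])
    []

-- ===== PORT B =====

-- body of Source B's `for _ in range(length)` loop; state = (abs_pos, prev, remaining content iterator)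
def stepInnerB (st : List Int × Int × List Int) (_i : Int) : List Int × Int × List Int :=
  match st with
  | (abs, prev, rem) => (abs ++ [prev + rem.headD 0], prev + rem.headD 0, rem.tail)

-- body of Source B's `for t_idx, length in enumerate(lengths)` loop
def tokenB (lenAll : Int) (st : List Int × Int × List Int) (p : Int × Int) :
    List Int × Int × List Int :=
  match st with
  | (abs, _prev, rem) =>
    match (PySem.List.pyRange 0 p.2 1).foldl stepInnerB (abs ++ [0], 0, rem) with
    | (abs1, _p1, rem1) =>
      if p.1 < lenAll - 1 then
        (abs1 ++ [1] ++ [1 + rem1.headD 0], 1 + rem1.headD 0, rem1.tail)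
      else
        (abs1 ++ [1], 1, rem1)

def absBuildB (lengths content : List Int) : List Int × Int × List Int :=
  (PySem.List.enumerate lengths).foldl (tokenB (PySem.List.len lengths)) ([], 0, content)

-- Source B's final comprehension: full[i] = abs_pos[i] - (abs_pos[i-1] if i > 0 else 0)
def diffB (abs : List Int) : List Int :=
  (List.range abs.length).map (fun i => abs.getD i 0 - if 0 < i then abs.getD (i - 1) 0 else 0)

def sentenceB (content lengths : List Int) : List Int :=
  diffB (absBuildB lengths content).1

def reconstruct_sentinel_deltas_per_sentence_py_alt (content_nested : List (List Int)) (root_lengths_nested : List (List Int)) : List (List Int) :=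
  (PySem.List.enumerate content_nested).foldl
    (fun full_nested p =>
      let lengths := if p.1 < PySem.List.len root_lengths_nested
                     then PySem.List.pyGetD root_lengths_nested p.1 [] else []
      full_nested ++ [sentenceB p.2 lengths])
    []

-- ===== PRECONDITION & SPEC =====
def Spec_reconstruct_sentinel_deltas_per_sentence_py (content_nested : List (List Int)) (root_lengths_nested : List (List Int)) (out : List (List Int)) : Prop := out = reconstruct_sentinel_deltas_per_sentence_py_alt content_nested root_lengths_nested
instance (content_nested : List (List Int)) (root_lengths_nested : List (List Int)) (out : List (List Int)) : Decidable (Spec_reconstruct_sentinel_deltas_per_sentence_py content_nested root_lengths_nested out) := by unfold Spec_reconstruct_sentinel_deltas_per_sentence_py; infer_instance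

-- ===== CLAIM (what is proved, stated in full; the proofs are below) =====
def Claim_equal_reconstruct_sentinel_deltas_per_sentence_py : Prop := ∀ (content_nested : List (List Int)) (root_lengths_nested : List (List Int)), Dom_reconstruct_sentinel_deltas_per_sentence_py content_nested root_lengths_nested → Spec_reconstruct_sentinel_deltas_per_sentence_py content_nested root_lengths_nested (reconstruct_sentinel_deltas_per_sentence_py content_nested root_lengths_nested)

-- ===== LEMMAS AND PROOFS =====

-- last element with default 0 (the `prev` value a well-formed abs_pos list determines)
def lastD (l : List Int) : Int := l.getD (l.length - 1) 0

theorem lastD_snoc (l : List Int) (x : Int) : lastD (l ++ [x]) = x := by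
  simp [lastD]

-- recursive form of A's sentinel layout (per-token chunks)
def layoutR : List Int → List Bool
  | [] => []
  | l :: ls =>
      true :: (List.replicate l.toNat false ++ ([true] ++
        ((if ls = [] then [] else [false]) ++ layoutR ls)))

-- recursive form of Source B's inner `for _ in range(length)` loop
def innerR : Nat → List Int → Int → List Int → List Int × Int × List Int
  | 0, abs, p, rem => (abs, p, rem)
  | n + 1, abs, p, rem => innerR n (abs ++ [p + rem.headD 0]) (p + rem.headD 0) rem.tail

-- recursive form of Source B's absolute-position construction (returns (abs_pos, leftover content))
def absR : List Int → List Int → List Int → List Int × List Int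
  | [], abs, rem => (abs, rem)
  | l :: ls, abs, rem =>
      match innerR l.toNat (abs ++ [0]) 0 rem with
      | (abs1, _p1, rem1) =>
        match ls with
        | [] => (abs1 ++ [1], rem1)
        | _ :: _ => absR ls (abs1 ++ [1] ++ [1 + rem1.headD 0]) rem1.tail

theorem diffB_snoc (l : List Int) (x : Int) :
    diffB (l ++ [x]) = diffB l ++ [x - lastD l] := by
  simp only [diffB, List.length_append, List.length_cons, List.length_nil, List.range_succ,
    List.map_append, List.map_cons, List.map_nil]
  congr 1
  · apply List.map_congr_left
    intro i hi
    rw [List.mem_range] at hi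
    rw [List.getD_append _ _ _ _ hi]
    by_cases h0 : 0 < i
    · rw [List.getD_append _ _ _ _ (by omega)]
    · simp [h0]
  · by_cases h0 : 0 < l.length
    · have hx : (l ++ [x]).getD l.length 0 = x := by
        simp [List.getD_eq_getElem?_getD]
      rw [hx, if_pos h0, List.getD_append _ _ _ _ (by omega)]
      simp [lastD]
    · have hl : l = [] := by
        cases l with | nil => rfl | cons a t => simp at h0
      subst hl; simp [lastD]

theorem layout_fold_general (ls : List Int) : ∀ (s N : Int) (acc : List Bool),
    s + ls.length = N →
    (PySem.List.enumerate ls s).foldl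
      (fun layout p =>
        (layout ++ [true] ++ List.replicate p.2.toNat false ++ [true]) ++
          (if p.1 < N - 1 then [false] else []))
      acc = acc ++ layoutR ls := by
  induction ls with
  | nil => intro s N acc h; simp [PySem.List.enumerate_nil, layoutR]
  | cons l ls ih =>
    intro s N acc h
    rw [PySem.List.enumerate_cons, List.foldl_cons]
    have hcond : (s < N - 1) = ¬(ls = []) := by
      simp only [List.length_cons] at h
      cases ls with
      | nil => simp at h ⊢; omega
      | cons a t => simp at h ⊢; omega
    rw [ih (s + 1) N _ (by simp at h ⊢; omega)]
    simp only [layoutR, hcond]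
    by_cases he : ls = [] <;> simp [he]

theorem pySentinelLayout_eq (lengths : List Int) :
    pySentinelLayout lengths = layoutR lengths := by
  have := layout_fold_general lengths 0 (PySem.List.len lengths) [] (by simp [PySem.List.len_eq])
  simp only [List.nil_append] at this
  exact this

theorem foldl_stepInnerB (xs : List Int) : ∀ (abs : List Int) (p : Int) (rem : List Int),
    xs.foldl stepInnerB (abs, p, rem) = innerR xs.length abs p rem := by
  induction xs with
  | nil => intro abs p rem; simp [innerR]
  | cons x xs ih => intro abs p rem; rw [List.foldl_cons]; exact ih _ _ _

theorem absBuild_fold_general (ls : List Int) : ∀ (s N : Int) (abs : List Int) (p : Int) (rem : List Int),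
    s + ls.length = N →
    ((PySem.List.enumerate ls s).foldl (tokenB N) (abs, p, rem)).1 = (absR ls abs rem).1 ∧
    ((PySem.List.enumerate ls s).foldl (tokenB N) (abs, p, rem)).2.2 = (absR ls abs rem).2 := by
  induction ls with
  | nil => intro s N abs p rem h; simp [PySem.List.enumerate_nil, absR]
  | cons l ls ih =>
    intro s N abs p rem h
    rw [PySem.List.enumerate_cons, List.foldl_cons]
    have hlen : (PySem.List.pyRange 0 l 1).length = l.toNat := by
      rw [PySem.List.length_pyRange_one 0 l, Int.sub_zero]
    simp only [tokenB, foldl_stepInnerB, hlen]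
    rcases hr : innerR l.toNat (abs ++ [0]) 0 rem with ⟨abs1, p1, rem1⟩
    cases ls with
    | nil =>
      have hnlt : ¬ s < N - 1 := by simp at h; omega
      simp [hr, hnlt, PySem.List.enumerate_nil, absR]
    | cons a t =>
      have hlt : s < N - 1 := by simp at h; omega
      simp only [hr, if_pos hlt, absR]
      exact ih (s + 1) N (abs1 ++ [1] ++ [1 + rem1.headD 0]) (1 + rem1.headD 0) rem1.tail
        (by simp at h ⊢; omega)

-- the inner content loop, seen through diffB: p = lastD abs is preserved, each delta appended
theorem innerA_eq (n : Nat) : ∀ (abs rem : List Int) (cnt : Nat) (p : Int),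
    p = lastD abs →
    (List.replicate n false).foldl stepA (diffB abs, some p, cnt, rem)
      = (diffB (innerR n abs p rem).1, some (innerR n abs p rem).2.1, cnt,
         (innerR n abs p rem).2.2) ∧
    (innerR n abs p rem).2.1 = lastD (innerR n abs p rem).1 := by
  induction n with
  | zero => intro abs rem cnt p hp; simp [innerR, hp]
  | succ n ih =>
    intro abs rem cnt p hp
    have hrepl : List.replicate (n + 1) false = false :: List.replicate n false := rfl
    rw [hrepl, List.foldl_cons]
    have hstep : stepA (diffB abs, some p, cnt, rem) false
        = (diffB (abs ++ [p + rem.headD 0]), some (p + rem.headD 0), cnt, rem.tail) := by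
      simp [stepA, diffB_snoc, hp]
    rw [hstep]
    have := ih (abs ++ [p + rem.headD 0]) rem.tail cnt (p + rem.headD 0) (by rw [lastD_snoc])
    simpa [innerR] using this

theorem stepA_false (full : List Int) (p : Int) (cnt : Nat) (rem : List Int) :
    stepA (full, some p, cnt, rem) false
      = (full ++ [rem.headD 0], some (p + rem.headD 0), cnt, rem.tail) := by
  simp [stepA]

theorem key_lemma (ls : List Int) : ∀ (abs rem : List Int) (prevo : Option Int) (cnt : Nat),
    cnt % 2 = 0 →
    (prevo = none ∧ abs = [] ∨ prevo = some (lastD abs)) →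
    ((layoutR ls).foldl stepA (diffB abs, prevo, cnt, rem)).1 = diffB (absR ls abs rem).1 := by
  induction ls with
  | nil => intro abs rem prevo cnt _ _; simp [layoutR, absR]
  | cons l ls ih =>
    intro abs rem prevo cnt hcnt hprev
    -- first sentinel: target 0
    have hstep1 : stepA (diffB abs, prevo, cnt, rem) true
        = (diffB (abs ++ [0]), some 0, cnt + 1, rem) := by
      rcases hprev with ⟨h1, h2⟩ | h1
      · subst h1; subst h2; simp [stepA, hcnt, diffB, List.range_succ]
      · subst h1; simp [stepA, hcnt, diffB_snoc]
    simp only [layoutR, List.foldl_cons, List.foldl_append, List.foldl_nil]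
    rw [hstep1]
    -- inner content loop
    have hinner := innerA_eq l.toNat (abs ++ [0]) rem (cnt + 1) 0 (by rw [lastD_snoc])
    rcases hr : innerR l.toNat (abs ++ [0]) 0 rem with ⟨abs1, p1, rem1⟩
    rw [hr] at hinner
    obtain ⟨hfold, hlast⟩ := hinner
    simp only at hfold hlast
    rw [hfold]
    -- second sentinel: cnt+1 is odd, target 1
    have hodd : ¬((cnt + 1) % 2 = 0) := by omega
    have hstep2 : stepA (diffB abs1, some p1, cnt + 1, rem1) true
        = (diffB (abs1 ++ [1]), some 1, cnt + 2, rem1) := by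
      simp only [stepA, if_neg hodd, diffB_snoc, hlast]
      norm_num
    rw [hstep2]
    cases ls with
    | nil => simp [layoutR, absR, hr]
    | cons a t =>
      simp only [if_neg (List.cons_ne_nil a t), List.foldl_cons, List.foldl_nil]
      rw [stepA_false]
      have hd : diffB (abs1 ++ [1] ++ [1 + rem1.headD 0])
          = diffB (abs1 ++ [1]) ++ [rem1.headD 0] := by
        rw [diffB_snoc (abs1 ++ [1]), lastD_snoc, add_sub_cancel_left]
      rw [← hd]
      rw [ih (abs1 ++ [1] ++ [1 + rem1.headD 0]) rem1.tail (some (1 + rem1.headD 0)) (cnt + 2)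
        (by omega) (Or.inr (by rw [lastD_snoc]))]
      rw [show absR (l :: a :: t) abs rem
          = absR (a :: t) (abs1 ++ [1] ++ [1 + rem1.headD 0]) rem1.tail from by
        simp only [absR, hr]]

theorem sentence_eq (content lengths : List Int) :
    sentenceA content lengths = sentenceB content lengths := by
  unfold sentenceA sentenceB absBuildB
  rw [pySentinelLayout_eq]
  have hb := absBuild_fold_general lengths 0 (PySem.List.len lengths) [] 0 content
    (by simp [PySem.List.len_eq])
  rw [hb.1]
  have hk := key_lemma lengths [] content none 0 (by omega) (Or.inl ⟨rfl, rfl⟩)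
  simpa [diffB] using hk

-- ===== VERDICT (by name: the statement is the Claim_ definition above) =====
theorem reconstruct_sentinel_deltas_per_sentence_py_spec : Claim_equal_reconstruct_sentinel_deltas_per_sentence_py := by
  intro content_nested root_lengths_nested _
  unfold Spec_reconstruct_sentinel_deltas_per_sentence_py
  unfold reconstruct_sentinel_deltas_per_sentence_py reconstruct_sentinel_deltas_per_sentence_py_alt
  simp only [sentence_eq]
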